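-- pv_equiv track=rewrite | github.com/Borroot/binairo-scripts | src/latex.py | latex_solutions
-- ===== SOURCE A (Python) =====
-- def latex_solutions(foldername, amount):
--     builder = ""
--
--     for number in range(0, amount, 3):
--         builder += "\\begin{figure}\n\\centering\n"
--         for i in range(3):
--             if number + i < amount:
--                 builder += (
--                     "\\begin{subfigure}{0.3\\textwidth}\n"
--                     f"    \\includegraphics[width=\\textwidth]{{{foldername}/{number + i:02d}s.png}}\n"
--                     f"    \\center {number + i + 1}\n"
--                     "\\end{subfigure}\n"
--                     "\\hfill\n"
--                 )
--         builder += "\\end{figure}\n\n"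
--
--     return builder
-- ===== SOURCE B (Python) =====
-- def latex_solutions(foldername, amount):
--     # One flat pass over all image indices; figure boundaries come from n % 3.
--     pieces = []
--     for n in range(amount):
--         if n % 3 == 0:
--             pieces.append("\\begin{figure}\n\\centering\n")
--         pieces.append(
--             "\\begin{subfigure}{0.3\\textwidth}\n"
--             f"    \\includegraphics[width=\\textwidth]{{{foldername}/{n:02d}s.png}}\n"
--             f"    \\center {n + 1}\n"
--             "\\end{subfigure}\n"
--             "\\hfill\n"
--         )
--         if n % 3 == 2 or n == amount - 1:
--             pieces.append("\\end{figure}\n\n")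
--     return "".join(pieces)
-- ===== Notes on version B (the rewrite author's own statement) =====
-- stated objective: simpler
-- what changed: Replaced A's nested group-of-three loop (outer range(0, amount, 3) plus inner range(3) with a bounds check) by a single flat pass over range(amount) that opens a figure at n % 3 == 0 and closes it at n % 3 == 2 or at the last index, joining collected pieces once at the end.
import Mathlib
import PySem

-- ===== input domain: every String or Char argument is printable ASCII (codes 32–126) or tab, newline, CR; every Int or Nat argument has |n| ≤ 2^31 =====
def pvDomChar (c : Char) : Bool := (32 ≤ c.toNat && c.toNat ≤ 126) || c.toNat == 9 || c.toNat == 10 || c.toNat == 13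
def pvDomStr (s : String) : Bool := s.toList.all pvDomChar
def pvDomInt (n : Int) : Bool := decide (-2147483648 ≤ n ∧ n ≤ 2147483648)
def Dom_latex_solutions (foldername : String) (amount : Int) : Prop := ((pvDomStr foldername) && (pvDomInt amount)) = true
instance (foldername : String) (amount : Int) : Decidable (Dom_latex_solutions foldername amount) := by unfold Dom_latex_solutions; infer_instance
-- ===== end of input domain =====

-- B replaces A's chunked outer(step 3)/inner(range 3) loop pair by ONE flat pass over
-- range(amount), opening a figure at n % 3 == 0 and closing it at n % 3 == 2 or at the
-- last index, joining collected pieces at the end (objective: simpler decomposition).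


-- shared literal text (identical string literals in both Pythons)
def pvBeg : List Char := "\\begin{figure}\n\\centering\n".toList
def pvEnd : List Char := "\\end{figure}\n\n".toList

-- f"{m:02d}": exact for width 2 (str(m) is padded with '0' only when it is one char long)
def pvPad2 (m : Int) : List Char :=
  let s := PySem.Int.toChars m
  if s.length < 2 then '0' :: s else s

-- the subfigure block both Pythons build for image index m (A uses m = number + i, B uses m = n)
def pvSub (f : List Char) (m : Int) : List Char :=
  "\\begin{subfigure}{0.3\\textwidth}\n    \\includegraphics[width=\\textwidth]{".toList
    ++ f ++ "/".toList ++ pvPad2 m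
    ++ "s.png}\n    \\center ".toList ++ PySem.Int.toChars (m + 1)
    ++ "\n\\end{subfigure}\n\\hfill\n".toList

-- ===== PORT A =====
def latex_solutions (foldername : String) (amount : Int) : String :=
  let builder : List Char := []
  let builder := (PySem.List.pyRange 0 amount 3).foldl (fun builder number =>
    let builder := builder ++ pvBeg
    let builder := (PySem.List.pyRange 0 3 1).foldl (fun builder i =>
      if number + i < amount then builder ++ pvSub foldername.toList (number + i)
      else builder) builder
    builder ++ pvEnd) builder
  String.ofList builder

-- ===== PORT B =====
def latex_solutions_alt (foldername : String) (amount : Int) : String :=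
  let pieces : List (List Char) := []
  let pieces := (PySem.List.pyRange 0 amount 1).foldl (fun pieces n =>
    let pieces := if PySem.Int.mod n 3 == 0 then pieces ++ [pvBeg] else pieces
    let pieces := pieces ++ [pvSub foldername.toList n]
    if PySem.Int.mod n 3 == 2 || n == amount - 1 then pieces ++ [pvEnd] else pieces) pieces
  String.ofList pieces.flatten   -- "".join(pieces)

-- ===== PRECONDITION & SPEC =====
def Spec_latex_solutions (foldername : String) (amount : Int) (out : String) : Prop := out = latex_solutions_alt foldername amount
instance (foldername : String) (amount : Int) (out : String) : Decidable (Spec_latex_solutions foldername amount out) := by unfold Spec_latex_solutions; infer_instance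

-- ===== CLAIM (what is proved, stated in full; the proofs are below) =====
def Claim_equal_latex_solutions : Prop := ∀ (foldername : String) (amount : Int), Dom_latex_solutions foldername amount → Spec_latex_solutions foldername amount (latex_solutions foldername amount)

-- ===== LEMMAS AND PROOFS =====

-- one figure of A (inner range(3) loop evaluated)
def pvFigA (f : List Char) (amount number : Int) : List Char :=
  pvBeg
    ++ (if number < amount then pvSub f number else [])
    ++ (if number + 1 < amount then pvSub f (number + 1) else [])
    ++ (if number + 2 < amount then pvSub f (number + 2) else [])
    ++ pvEnd

-- what B appends to `pieces` at index n, already flattened to characters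
def pvStepB (f : List Char) (amount n : Int) : List Char :=
  (if PySem.Int.mod n 3 == 0 then pvBeg else [])
    ++ pvSub f n
    ++ (if PySem.Int.mod n 3 == 2 || n == amount - 1 then pvEnd else [])

theorem pvRange3_cons (a b : Int) (h : a < b) :
    PySem.List.pyRange a b 3 = a :: PySem.List.pyRange (a + 3) b 3 := by
  rw [PySem.List.pyRange_of_pos a b (by norm_num),
      PySem.List.pyRange_of_pos (a + 3) b (by norm_num)]
  have h1 : ((b - a + 3 - 1) / 3).toNat
      = (if a + 3 < b then ((b - (a + 3) + 3 - 1) / 3).toNat else 0) + 1 := by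
    split_ifs <;> omega
  rw [if_pos h, h1, List.range_succ_eq_map]
  simp only [List.map_cons, List.map_map]
  congr 1
  · push_cast; ring
  · apply List.map_congr_left
    intro k _
    simp only [Function.comp_apply]
    push_cast; ring

theorem pvA_foldl (f : List Char) (amount : Int) (l : List Int) (acc : List Char) :
    l.foldl (fun builder number =>
      let builder := builder ++ pvBeg
      let builder := (PySem.List.pyRange 0 3 1).foldl (fun builder i =>
        if number + i < amount then builder ++ pvSub f (number + i) else builder) builder
      builder ++ pvEnd) acc
    = acc ++ l.flatMap (pvFigA f amount) := by
  have : (fun (builder : List Char) (number : Int) =>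
      let builder := builder ++ pvBeg
      let builder := (PySem.List.pyRange 0 3 1).foldl (fun builder i =>
        if number + i < amount then builder ++ pvSub f (number + i) else builder) builder
      builder ++ pvEnd)
      = fun builder number => builder ++ pvFigA f amount number := by
    funext builder number
    have hr : PySem.List.pyRange 0 3 1 = [0, 1, 2] := by decide
    simp only [hr, List.foldl_cons, List.foldl_nil, pvFigA]
    split_ifs with h0 h1 h2 <;> simp_all [List.append_assoc]
  rw [this, PySem.List.foldl_append_eq_flatMap]

theorem pvB_foldl (f : List Char) (amount : Int) (l : List Int) (acc : List (List Char)) :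
    (l.foldl (fun pieces n =>
      let pieces := if PySem.Int.mod n 3 == 0 then pieces ++ [pvBeg] else pieces
      let pieces := pieces ++ [pvSub f n]
      if PySem.Int.mod n 3 == 2 || n == amount - 1 then pieces ++ [pvEnd] else pieces) acc).flatten
    = acc.flatten ++ l.flatMap (pvStepB f amount) := by
  induction l generalizing acc with
  | nil => simp
  | cons n l ih =>
      simp only [List.foldl_cons, List.flatMap_cons, ih]
      rw [← List.append_assoc]
      congr 1
      simp only [pvStepB]
      split_ifs <;> simp [List.append_assoc]

-- the heart: one pass over range(n, amount) equals the chunked figures from n on,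
-- provided n is a nonnegative multiple of 3 (fuel k bounds amount - n)
theorem pvMain (f : List Char) (amount : Int) (k : Nat) :
    ∀ n : Int, 0 ≤ n → n % 3 = 0 → amount ≤ n + k →
    (PySem.List.pyRange n amount 3).flatMap (pvFigA f amount)
      = (PySem.List.pyRange n amount 1).flatMap (pvStepB f amount) := by
  induction k with
  | zero =>
      intro n _ _ hle
      rw [PySem.List.pyRange_one_eq_nil (by omega),
          PySem.List.pyRange_of_pos n amount (by norm_num), if_neg (by omega)]
      simp
  | succ k ih =>
      intro n hn hmod hle
      by_cases hlt : n < amount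
      · have hmodn : PySem.Int.mod n 3 = n % 3 := PySem.Int.mod_eq_emod_of_pos (by norm_num)
        have hmod1 : PySem.Int.mod (n + 1) 3 = (n + 1) % 3 := PySem.Int.mod_eq_emod_of_pos (by norm_num)
        have hmod2 : PySem.Int.mod (n + 2) 3 = (n + 2) % 3 := PySem.Int.mod_eq_emod_of_pos (by norm_num)
        rw [pvRange3_cons n amount hlt]
        by_cases h3 : n + 3 ≤ amount
        · -- a full figure: peel n, n+1, n+2 from the flat range
          rw [PySem.List.pyRange_one_cons hlt,
              PySem.List.pyRange_one_cons (show n + 1 < amount by omega),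
              PySem.List.pyRange_one_cons (show n + 1 + 1 < amount by omega)]
          simp only [List.flatMap_cons]
          rw [show n + 1 + 1 + 1 = n + 3 by ring, show n + 1 + 1 = n + 2 by ring]
          rw [ih (n + 3) (by omega) (by omega) (by omega)]
          simp only [pvFigA, pvStepB, hmodn, hmod1, hmod2]
          have e0 : (n % 3 == 0) = true := by simp [hmod]
          have e1 : ((n + 1) % 3 == 0) = false := by simp; omega
          have e2 : ((n + 1) % 3 == 2) = false := by simp; omega
          have e3 : ((n + 2) % 3 == 0) = false := by simp; omega
          have e4 : ((n + 2) % 3 == 2) = true := by simp; omega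
          have e5 : (n == amount - 1) = false := by simp; omega
          have e6 : (n + 1 == amount - 1) = false := by simp; omega
          have e7 : (n % 3 == 2) = false := by simp; omega
          simp [e0, e1, e2, e3, e4, e5, e6, e7,
            show n < amount by omega, show n + 1 < amount by omega,
            show n + 2 < amount by omega, List.append_assoc]
        · -- last, partial figure: the step-3 tail is empty
          have htail3 : PySem.List.pyRange (n + 3) amount 3 = [] := by
            rw [PySem.List.pyRange_of_pos (n + 3) amount (by norm_num), if_neg (by omega)]
            simp
          rw [htail3]
          by_cases h1 : n + 1 < amount
          · -- two images left: amount = n + 2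
            rw [PySem.List.pyRange_one_cons hlt,
                PySem.List.pyRange_one_cons h1,
                PySem.List.pyRange_one_eq_nil (show amount ≤ n + 1 + 1 by omega)]
            simp only [List.flatMap_cons, List.flatMap_nil, List.append_nil,
              pvFigA, pvStepB, hmodn, hmod1]
            have e0 : (n % 3 == 0) = true := by simp [hmod]
            have e1 : ((n + 1) % 3 == 0) = false := by simp; omega
            have e2 : ((n + 1) % 3 == 2) = false := by simp; omega
            have e5 : (n == amount - 1) = false := by simp; omega
            have e6 : (n + 1 == amount - 1) = true := by simp; omega
            have e7 : (n % 3 == 2) = false := by simp; omega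
            simp [e0, e1, e2, e5, e6, e7, hlt, h1,
              show ¬ n + 2 < amount by omega, List.append_assoc]
          · -- one image left: amount = n + 1
            rw [PySem.List.pyRange_one_cons hlt,
                PySem.List.pyRange_one_eq_nil (show amount ≤ n + 1 by omega)]
            simp only [List.flatMap_cons, List.flatMap_nil, List.append_nil,
              pvFigA, pvStepB, hmodn]
            have e0 : (n % 3 == 0) = true := by simp [hmod]
            have e5 : (n == amount - 1) = true := by simp; omega
            have e7 : (n % 3 == 2) = false := by simp; omega
            simp [e0, e5, e7, hlt, show ¬ n + 1 < amount by omega,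
              show ¬ n + 2 < amount by omega, List.append_assoc]
      · rw [PySem.List.pyRange_one_eq_nil (by omega),
            PySem.List.pyRange_of_pos n amount (by norm_num), if_neg (by omega)]
        simp

-- ===== VERDICT (by name: the statement is the Claim_ definition above) =====
theorem latex_solutions_spec : Claim_equal_latex_solutions := by
  intro foldername amount hdom
  unfold Spec_latex_solutions latex_solutions latex_solutions_alt
  simp only []
  rw [pvA_foldl, pvB_foldl]
  simp only [List.nil_append, List.flatten_nil]
  congr 1
  exact pvMain foldername.toList amount (amount.toNat) 0 le_rfl rfl (by omega)
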